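-- pv_equiv track=rewrite | github.com/mapstract/medium | old_code.py | S_n_j_recursive
-- ===== SOURCE A (Python) =====
-- def S_n_j_recursive(n, j, d=None):
--     # this is verified as correct
--     ul1 = 1
--
--     if d is None:
--         d = {}
--         for i in range(1, n - 1 + ul1):
--             d[(i, i)] = 1
--
--     if (n, j) in d:
--         return d[(n, j)]
--
--     def pos_part(x):
--         if x < 0:
--             return 0
--         else:
--             return x
--
--     result = 0
--     for m in range(j, n + ul1):
--         tmp =  (m - j + 1) * 2**(pos_part(n - m - 1))
--         result += tmp
--
--     for m in range(0, n - j - 1 + ul1):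
--         tmp = S_n_j_recursive(n - m - 1, j, d)
--         result += tmp
--
--     d[(n, j)] = result
--
--     return result
-- ===== SOURCE B (Python) =====
-- def S_n_j_recursive(n, j, d=None):
--     # Bottom-up prefix-sum rewrite of A (same return values; A also memoizes
--     # into the caller's d in place -- B only reads d, so the proved equivalence
--     # is about the return value).
--     # Closed form of A's weighted sum: A(k, j) = 2**(k-j+1) - 1 for k >= j,
--     # and S(k, j) = d.get((k, j), A(k, j) + sum of S(i, j) for j <= i < k).
--     if d is None:
--         d = {(i, i): 1 for i in range(1, n)}
--     if (n, j) in d: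
--         return d[(n, j)]
--     if n < j:
--         return 0
--     total = 0   # running sum of S(j, j), ..., S(k-1, j)
--     p = 2       # 2**(k-j+1)
--     for k in range(j, n):
--         total += d.get((k, j), p - 1 + total)
--         p *= 2
--     return p - 1 + total
-- ===== Notes on version B (the rewrite author's own statement) =====
-- stated objective: alternative
-- what changed: Replaces A's memoized top-down double recursion (an inner weighted-sum loop plus a loop of recursive calls per level) by a single bottom-up pass that keeps a running prefix sum of the S-values and uses the closed form 2^(k-j+1)-1 for A's inner weighted sum; A's in-place memo writes to d are not reproduced (return value is identical).
import Mathlib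
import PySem

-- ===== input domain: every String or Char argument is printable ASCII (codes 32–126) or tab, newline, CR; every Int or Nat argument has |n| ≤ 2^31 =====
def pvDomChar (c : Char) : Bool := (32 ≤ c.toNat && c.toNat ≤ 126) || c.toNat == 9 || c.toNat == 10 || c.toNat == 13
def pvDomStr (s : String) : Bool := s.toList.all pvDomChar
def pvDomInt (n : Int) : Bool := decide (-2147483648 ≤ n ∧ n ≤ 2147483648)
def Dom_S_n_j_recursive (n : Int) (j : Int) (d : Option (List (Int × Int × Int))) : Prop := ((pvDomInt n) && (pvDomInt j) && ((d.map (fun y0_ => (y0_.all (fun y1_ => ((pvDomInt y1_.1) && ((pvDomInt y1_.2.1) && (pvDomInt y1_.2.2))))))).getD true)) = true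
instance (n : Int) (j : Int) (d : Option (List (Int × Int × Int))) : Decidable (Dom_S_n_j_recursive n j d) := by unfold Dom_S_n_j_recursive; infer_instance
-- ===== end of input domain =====

-- B replaces A's memoized double recursion by one bottom-up pass with a running
-- prefix sum and the closed form 2^(k-j+1)-1 for A's inner weighted sum.
-- A mutates the caller's dict d in place (memo writes); B only reads it: the
-- equivalence proved here is about the RETURN value.

-- ===== PORT A =====
-- shared type-convention adapter: the Option-list argument as the Python dict
-- (None => the seed loop 'for i in range(1, n): d[(i,i)] = 1')
def pvInitDict (n : Int) (d : Option (List (Int × Int × Int))) : PySem.Dict (Int × Int) Int :=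
  match d with
  | none => (PySem.List.pyRange 1 n 1).foldl (fun dd i => dd.insert (i, i) 1) PySem.Dict.empty
  | some l => l.foldl (fun dd e => dd.insert (e.1, e.2.1) e.2.2) PySem.Dict.empty

def pvPosPart (x : Int) : Int := if x < 0 then 0 else x

-- A's recursive body, structurally recursive on a fuel counter.
-- fuel is ONLY a totality guard: the top call passes (n-j).toNat + 1 and every
-- recursive call strictly decreases n-j, so the 0-fuel branch is unreachable
-- (pvAcore_main / pvAcore_neg below never use it).
def pvAcore : Nat → Int → Int → PySem.Dict (Int × Int) Int → Int × PySem.Dict (Int × Int) Int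
  | 0, _, _, d => (0, d)
  | fuel + 1, n, j, d =>
    match d.get? (n, j) with
    | some v => (v, d)
    | none =>
      -- result after the first loop: for m in range(j, n+1)
      let r1 := (PySem.List.pyRange j (n + 1) 1).foldl
        (fun acc m => acc + (m - j + 1) * 2 ^ (pvPosPart (n - m - 1)).toNat) 0
      -- second loop: for m in range(0, n-j): result += S(n-m-1, j, d)
      let rd := (PySem.List.pyRange 0 (n - j) 1).foldl
        (fun (ad : Int × PySem.Dict (Int × Int) Int) m =>
          let td := pvAcore fuel (n - m - 1) j ad.2
          (ad.1 + td.1, td.2)) (r1, d)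
      (rd.1, rd.2.insert (n, j) rd.1)

def S_n_j_recursive (n : Int) (j : Int) (d : Option (List (Int × Int × Int))) : Int :=
  (pvAcore ((n - j).toNat + 1) n j (pvInitDict n d)).1

-- ===== PORT B =====
def S_n_j_recursive_alt (n : Int) (j : Int) (d : Option (List (Int × Int × Int))) : Int :=
  let d0 := pvInitDict n d
  match d0.get? (n, j) with
  | some v => v
  | none =>
    if n < j then 0
    else
      -- one pass k = j .. n-1; state (total, p) = (running prefix sum, 2^(k-j+1))
      let tp := (PySem.List.pyRange j n 1).foldl
        (fun (tp : Int × Int) k =>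
          (tp.1 + ((d0.get? (k, j)).getD (tp.2 - 1 + tp.1)), tp.2 * 2))
        ((0 : Int), (2 : Int))
      tp.2 - 1 + tp.1

-- ===== PRECONDITION & SPEC =====
def Spec_S_n_j_recursive (n : Int) (j : Int) (d : Option (List (Int × Int × Int))) (out : Int) : Prop := out = S_n_j_recursive_alt n j d
instance (n : Int) (j : Int) (d : Option (List (Int × Int × Int))) (out : Int) : Decidable (Spec_S_n_j_recursive n j d out) := by unfold Spec_S_n_j_recursive; infer_instance

-- ===== CLAIM (what is proved, stated in full; the proofs are below) =====
def Claim_equal_S_n_j_recursive : Prop := ∀ (n : Int) (j : Int) (d : Option (List (Int × Int × Int))), Dom_S_n_j_recursive n j d → Spec_S_n_j_recursive n j d (S_n_j_recursive n j d)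

-- ===== LEMMAS AND PROOFS =====

-- B's loop state after i steps (k = j + i), as a function of i
def pvT (j : Int) (d0 : PySem.Dict (Int × Int) Int) : Nat → Int × Int
  | 0 => (0, 2)
  | i + 1 =>
    let tp := pvT j d0 i
    (tp.1 + ((d0.get? (j + i, j)).getD (tp.2 - 1 + tp.1)), tp.2 * 2)

-- the value S(j+i, j) computed from the INITIAL dict d0
def pvW (j : Int) (d0 : PySem.Dict (Int × Int) Int) (i : Nat) : Int :=
  (d0.get? (j + i, j)).getD (2 ^ (i + 1) - 1 + (pvT j d0 i).1)

lemma pvT_snd (j : Int) (d0 : PySem.Dict (Int × Int) Int) (i : Nat) :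
    (pvT j d0 i).2 = 2 ^ (i + 1) := by
  induction i with
  | zero => rfl
  | succ i ih => simp [pvT, ih]; ring

lemma pvT_succ_fst (j : Int) (d0 : PySem.Dict (Int × Int) Int) (i : Nat) :
    (pvT j d0 (i + 1)).1 = (pvT j d0 i).1 + pvW j d0 i := by
  simp [pvT, pvW, pvT_snd]

-- B's fold over pyRange j (j+i) is pvT i
lemma pvB_fold (j : Int) (d0 : PySem.Dict (Int × Int) Int) (i : Nat) :
    (PySem.List.pyRange j (j + i) 1).foldl
      (fun (tp : Int × Int) k =>
        (tp.1 + ((d0.get? (k, j)).getD (tp.2 - 1 + tp.1)), tp.2 * 2))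
      ((0 : Int), (2 : Int)) = pvT j d0 i := by
  induction i with
  | zero => simp [pvT]
  | succ i ih =>
    have : j + (i + 1 : Nat) = (j + i) + 1 := by push_cast; ring
    rw [this, PySem.List.pyRange_one_succ_right (by omega), List.foldl_append, ih]
    simp [pvT]

-- A's inner weighted sum, without its last term: sum_{m=j}^{j+i-1} (m-j+1)*2^{(j+i)-m-1}
lemma pvH (j : Int) (i : Nat) :
    (PySem.List.pyRange j (j + i) 1).foldl
      (fun acc m => acc + (m - j + 1) * 2 ^ (pvPosPart ((j + i) - m - 1)).toNat) 0
      = 2 ^ (i + 1) - i - 2 := by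
  induction i with
  | zero =>
    rw [PySem.List.pyRange_one_eq_nil (by omega)]
    simp
  | succ i ih =>
    have hsp : j + ((i:Nat) + 1 : Nat) = (j + i) + 1 := by push_cast; ring
    rw [hsp, PySem.List.pyRange_one_succ_right (by omega), List.foldl_append]
    have hcong : (PySem.List.pyRange j (j + i) 1).foldl
        (fun acc m => acc + (m - j + 1) * 2 ^ (pvPosPart ((j + i) + 1 - m - 1)).toNat) 0
        = (PySem.List.pyRange j (j + i) 1).foldl
        (fun acc m => acc + 2 * ((m - j + 1) * 2 ^ (pvPosPart ((j + i) - m - 1)).toNat)) 0 := by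
      apply PySem.List.foldl_congr_mem
      intro acc m hm
      rw [PySem.List.mem_pyRange_one] at hm
      have h1 : pvPosPart ((j + i) + 1 - m - 1) = (j + i) - m := by unfold pvPosPart; split <;> omega
      have h2 : pvPosPart ((j + i) - m - 1) = (j + i) - m - 1 := by unfold pvPosPart; split <;> omega
      have h3 : ((j + i) - m).toNat = ((j + i) - m - 1).toNat + 1 := by omega
      rw [h1, h2, h3, pow_succ']
      ring
    rw [hcong,
      PySem.List.foldl_add (g := fun m => 2 * ((m - j + 1) * 2 ^ (pvPosPart ((j + i) - m - 1)).toNat)),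
      List.sum_map_mul_left]
    rw [PySem.List.foldl_add (g := fun m => (m - j + 1) * 2 ^ (pvPosPart ((j + i) - m - 1)).toNat)] at ih
    have hs : (List.map (fun m => (m - j + 1) * 2 ^ (pvPosPart (j + (i:Int) - m - 1)).toNat)
        (PySem.List.pyRange j (j + (i:Int)))).sum = 2 ^ (i + 1) - (i:Int) - 2 := by linarith [ih]
    simp only [List.foldl]
    rw [hs]
    have h0 : pvPosPart ((j + i) + 1 - (j + i) - 1) = 0 := by unfold pvPosPart; split <;> omega
    rw [h0]
    have : (2:Int) ^ (i + 1 + 1) = 2 * 2 ^ (i + 1) := by rw [pow_succ]; ring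
    push_cast
    simp only [this]
    ring

-- A's first loop equals the closed form 2^(i+1) - 1  (n = j + i)
lemma pvR1_closed (j : Int) (i : Nat) :
    (PySem.List.pyRange j ((j + i) + 1) 1).foldl
      (fun acc m => acc + (m - j + 1) * 2 ^ (pvPosPart ((j + i) - m - 1)).toNat) 0
      = 2 ^ (i + 1) - 1 := by
  rw [PySem.List.pyRange_one_succ_right (by omega), List.foldl_append, pvH]
  simp only [List.foldl]
  have h0 : pvPosPart ((j + i) - (j + i) - 1) = 0 := by unfold pvPosPart; split <;> omega
  rw [h0]
  push_cast
  ring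

-- the threaded-dict invariant: every (k, j)-entry of d agrees with d0's picture
def pvGood (j : Int) (d0 d : PySem.Dict (Int × Int) Int) : Prop :=
  ∀ k : Int, d.get? (k, j) = d0.get? (k, j) ∨
    (d0.get? (k, j) = none ∧ ∃ i : Nat, k = j + i ∧ d.get? (k, j) = some (pvW j d0 i))

-- the loop 'for m in range(0, n-j)' under the invariant: each call returns pvW
lemma pvAloop_inv (j : Int) (d0 : PySem.Dict (Int × Int) Int) (i f : Nat)
    (IH : ∀ i' : Nat, i' < i → ∀ d, pvGood j d0 d →
      (pvAcore f (j + i') j d).1 = pvW j d0 i' ∧ pvGood j d0 (pvAcore f (j + i') j d).2) :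
    ∀ c : Nat, c ≤ i → ∀ acc d, pvGood j d0 d →
      ((PySem.List.pyRange 0 (c : Int) 1).foldl
        (fun (ad : Int × PySem.Dict (Int × Int) Int) m =>
          let td := pvAcore f ((j + i) - m - 1) j ad.2
          (ad.1 + td.1, td.2)) (acc, d)).1
        = acc + (pvT j d0 i).1 - (pvT j d0 (i - c)).1 ∧
      pvGood j d0 (((PySem.List.pyRange 0 (c : Int) 1).foldl
        (fun (ad : Int × PySem.Dict (Int × Int) Int) m =>
          let td := pvAcore f ((j + i) - m - 1) j ad.2
          (ad.1 + td.1, td.2)) (acc, d)).2) := by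
  intro c
  induction c with
  | zero =>
    intro _ acc d hg
    rw [PySem.List.pyRange_one_eq_nil (by omega)]
    exact ⟨by simp, hg⟩
  | succ c ihc =>
    intro hc acc d hg
    have hsp : ((c : Nat) + 1 : Nat) = ((c : Int) + 1).toNat := by omega
    have : PySem.List.pyRange 0 ((c : Nat) + 1 : Nat) 1
        = PySem.List.pyRange 0 (c : Int) 1 ++ [(c : Int)] := by
      push_cast
      exact PySem.List.pyRange_one_succ_right (by omega)
    rw [this, List.foldl_append]
    have hprev := ihc (by omega) acc d hg
    have harg : (j + (i : Int)) - (c : Int) - 1 = j + ((i - c - 1 : Nat) : Int) := by omega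
    have hcall := IH (i - c - 1) (by omega)
      ((((PySem.List.pyRange 0 (c : Int) 1).foldl
        (fun (ad : Int × PySem.Dict (Int × Int) Int) m =>
          let td := pvAcore f ((j + i) - m - 1) j ad.2
          (ad.1 + td.1, td.2)) (acc, d))).2) hprev.2
    simp only [List.foldl, harg]
    have hT : (pvT j d0 (i - c)).1 = (pvT j d0 (i - c - 1)).1 + pvW j d0 (i - c - 1) := by
      obtain ⟨t, ht⟩ : ∃ t, i - c = t + 1 := ⟨i - c - 1, by omega⟩
      have ht2 : i - c - 1 = t := by omega
      rw [ht2, ht, pvT_succ_fst]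
    refine ⟨?_, hcall.2⟩
    rw [hprev.1, hcall.1, hT]
    have hsub : i - (c + 1) = i - c - 1 := by omega
    rw [hsub]
    ring

-- main invariant: A's recursion computes pvW and keeps the dict pvGood
lemma pvAcore_main (j : Int) (d0 : PySem.Dict (Int × Int) Int) :
    ∀ i f : Nat, i < f → ∀ d, pvGood j d0 d →
      (pvAcore f (j + i) j d).1 = pvW j d0 i ∧ pvGood j d0 (pvAcore f (j + i) j d).2 := by
  intro i
  induction i using Nat.strong_induction_on with
  | _ i IH =>
    intro f hf d hg
    obtain ⟨f, rfl⟩ : ∃ f', f = f' + 1 := ⟨f - 1, by omega⟩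
    rw [pvAcore]
    cases hdg : d.get? (j + (i:Int), j) with
    | some v =>
      simp only []
      constructor
      · rcases hg (j + (i:Int)) with h1 | ⟨h0, i', hi', hv⟩
        · rw [hdg] at h1
          simp [pvW, ← h1]
        · have : i' = i := by omega
          subst this
          rw [hdg] at hv
          exact Option.some.inj hv
      · exact hg
    | none =>
      have h0 : d0.get? (j + (i:Int), j) = none := by
        rcases hg (j + (i:Int)) with h1 | ⟨h0, _⟩
        · rw [← h1, hdg]
        · exact h0
      have IH' : ∀ i' : Nat, i' < i → ∀ d, pvGood j d0 d →
          (pvAcore f (j + i') j d).1 = pvW j d0 i' ∧ pvGood j d0 (pvAcore f (j + i') j d).2 :=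
        fun i' hi' d hd => IH i' hi' f (by omega) d hd
      simp only []
      rw [pvR1_closed]
      have hrange : (j + (i:Int)) - j = ((i : Nat) : Int) := by omega
      rw [hrange]
      have hloop := pvAloop_inv j d0 i f IH' i (le_refl i) (2 ^ (i + 1) - 1) d hg
      have hval : ((PySem.List.pyRange 0 (i : Int) 1).foldl
          (fun (ad : Int × PySem.Dict (Int × Int) Int) m =>
            let td := pvAcore f ((j + i) - m - 1) j ad.2
            (ad.1 + td.1, td.2)) (2 ^ (i + 1) - 1, d)).1 = pvW j d0 i := by
        rw [hloop.1, pvW, h0]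
        simp [pvT]
      refine ⟨hval, ?_⟩
      intro k
      by_cases hk : k = j + (i:Int)
      · subst hk
        right
        refine ⟨h0, i, rfl, ?_⟩
        simp [hval]
      · have hne : ((k, j) : Int × Int) ≠ (j + (i:Int), j) := by
          intro hc; exact hk (congrArg Prod.fst hc)
        rw [PySem.Dict.get?_insert_of_ne _ _ hne]
        exact hloop.2 k

lemma pvAcore_neg (n j : Int) (f : Nat) (d : PySem.Dict (Int × Int) Int) (hn : n < j)
    (h : d.get? (n, j) = none) : (pvAcore (f + 1) n j d).1 = 0 := by
  rw [pvAcore, h]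
  simp only []
  rw [PySem.List.pyRange_one_eq_nil (by omega : n + 1 ≤ j),
      PySem.List.pyRange_one_eq_nil (by omega : n - j ≤ 0)]
  simp

-- ===== VERDICT (by name: the statement is the Claim_ definition above) =====
theorem S_n_j_recursive_spec : Claim_equal_S_n_j_recursive := by
  intro n j d _
  unfold Spec_S_n_j_recursive S_n_j_recursive S_n_j_recursive_alt
  set d0 := pvInitDict n d with hd0
  cases hget : d0.get? (n, j) with
  | some v =>
    unfold pvAcore
    simp [hget]
  | none =>
    by_cases hn : n < j
    · simp only [hget, hn, if_true]
      exact pvAcore_neg n j (n - j).toNat d0 hn hget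
    · have hij : n = j + ((n - j).toNat : Int) := by omega
      have := pvAcore_main j d0 (n - j).toNat ((n - j).toNat + 1) (by omega) d0 (fun k => Or.inl rfl)
      rw [← hij] at this
      simp only [hget, hn, if_false]
      rw [this.1]
      have hb := pvB_fold j d0 (n - j).toNat
      rw [← hij] at hb
      rw [hb]
      unfold pvW
      rw [← hij, hget]
      simp [pvT_snd]
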